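-- pv_equiv track=rewrite | github.com/yaeba/binary-search-solutions | solutions/Sorting-Mail.py | solve
-- ===== SOURCE A (Python) =====
-- def solve(mailboxes):
--     queue = [(i, 0) for i in range(len(mailboxes))]
--     res = []
--     for i, j in queue:
--         if j < len(mailboxes[i]):
--             if mailboxes[i][j] != "junk":
--                 res.append(mailboxes[i][j])
--             # enqueue next
--             queue.append((i, j + 1))
--     return res
-- ===== SOURCE B (Python) =====
-- def solve(mailboxes):
--     maxlen = max((len(m) for m in mailboxes), default=0)
--     res = []
--     for j in range(maxlen):
--         for i in range(len(mailboxes)):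
--             if j < len(mailboxes[i]) and mailboxes[i][j] != "junk":
--                 res.append(mailboxes[i][j])
--     return res
-- ===== Notes on version B (the rewrite author's own statement) =====
-- stated objective: simpler
-- what changed: Replaced the growing FIFO work-list of (mailbox, position) pairs with two plain nested loops (columns outer, mailboxes inner) bounded by the precomputed maximum mailbox length, producing the same column-major order.
import Mathlib
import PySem

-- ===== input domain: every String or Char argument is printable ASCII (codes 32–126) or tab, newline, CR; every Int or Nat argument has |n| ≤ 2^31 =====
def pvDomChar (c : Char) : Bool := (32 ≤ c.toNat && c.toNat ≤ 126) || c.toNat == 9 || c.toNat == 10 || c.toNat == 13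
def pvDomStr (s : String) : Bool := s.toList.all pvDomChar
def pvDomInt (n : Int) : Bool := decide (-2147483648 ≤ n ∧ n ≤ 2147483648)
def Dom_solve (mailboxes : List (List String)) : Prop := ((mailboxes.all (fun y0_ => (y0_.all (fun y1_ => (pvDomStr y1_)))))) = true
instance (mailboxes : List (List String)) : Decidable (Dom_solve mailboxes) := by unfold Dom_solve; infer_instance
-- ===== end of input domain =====

-- B replaces A's growing FIFO work-list with two plain nested loops (columns outer,
-- mailboxes inner) bounded by the precomputed maximum mailbox length (objective: simpler).

-- ===== PORT A =====
-- termination measure for A's work-list loop (proof machinery only; the values computed are A's)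
def qMeasure (ms : List (List String)) (q : List (Nat × Nat)) : Nat :=
  q.length + (q.map (fun p => (ms[p.1]?.getD []).length + 1 - p.2)).sum

-- A's 'for i, j in queue' over the growing work-list, with 'res' the accumulator
def solveAux (ms : List (List String)) (queue : List (Nat × Nat)) (res : List String) : List String :=
  match queue with
  | [] => res
  | (i, j) :: rest =>
    if j < (ms[i]?.getD []).length then
      solveAux ms (rest ++ [(i, j + 1)])
        (if (ms[i]?.getD [])[j]?.getD "" ≠ "junk" then res ++ [(ms[i]?.getD [])[j]?.getD ""] else res)
    else
      solveAux ms rest res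
termination_by qMeasure ms queue
decreasing_by
  · simp [qMeasure, List.map_append, List.sum_append]; omega
  · simp [qMeasure]; omega

def solve (mailboxes : List (List String)) : List String :=
  solveAux mailboxes ((List.range mailboxes.length).map (fun i => (i, 0))) []

-- ===== PORT B =====
def solve_alt (mailboxes : List (List String)) : List String :=
  let maxlen := mailboxes.foldl (fun acc m => max acc m.length) 0
  (List.range maxlen).foldl (fun res j =>
    (List.range mailboxes.length).foldl (fun res i =>
      if j < (mailboxes[i]?.getD []).length ∧ (mailboxes[i]?.getD [])[j]?.getD "" ≠ "junk" then
        res ++ [(mailboxes[i]?.getD [])[j]?.getD ""]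
      else res) res) []

-- ===== PRECONDITION & SPEC =====
def Spec_solve (mailboxes : List (List String)) (out : List String) : Prop := out = solve_alt mailboxes
instance (mailboxes : List (List String)) (out : List String) : Decidable (Spec_solve mailboxes out) := by unfold Spec_solve; infer_instance

-- ===== CLAIM (what is proved, stated in full; the proofs are below) =====
def Claim_equal_solve : Prop := ∀ (mailboxes : List (List String)), Dom_solve mailboxes → Spec_solve mailboxes (solve mailboxes)

-- ===== LEMMAS AND PROOFS =====

-- the items column j of mailbox i contributes to the output
def colF (ms : List (List String)) (j : Nat) (i : Nat) : List String :=
  if j < (ms[i]?.getD []).length ∧ (ms[i]?.getD [])[j]?.getD "" ≠ "junk" then [(ms[i]?.getD [])[j]?.getD ""] else []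

lemma flatMap_filter_colF (ms : List (List String)) (j j' : Nat) (hjj : j ≤ j') (S : List Nat) :
    (S.filter (fun i => decide (j < (ms[i]?.getD []).length))).flatMap (colF ms j')
      = S.flatMap (colF ms j') := by
  induction S with
  | nil => simp
  | cons i S ih =>
    rw [List.filter_cons]
    by_cases h : j < (ms[i]?.getD []).length
    · simp only [h, decide_true, if_pos, List.flatMap_cons, ih]
    · have hc : colF ms j' i = [] := by
        unfold colF
        rw [if_neg]
        rintro ⟨h1, -⟩
        exact h (lt_of_le_of_lt hjj h1)
      simp only [h, decide_false, if_neg, Bool.false_eq_true, not_false_iff, List.flatMap_cons, hc,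
        List.nil_append, ih]

-- one pass of A's work-list processes one full column and queues the survivors
lemma colStep (ms : List (List String)) (j : Nat) :
    ∀ (A B : List Nat) (res : List String),
      solveAux ms (A.map (fun i => (i, j)) ++ B.map (fun i => (i, j + 1))) res
        = solveAux ms ((B ++ A.filter (fun i => decide (j < (ms[i]?.getD []).length))).map (fun i => (i, j + 1)))
            (res ++ A.flatMap (colF ms j)) := by
  intro A
  induction A with
  | nil => simp
  | cons i A ih =>
    intro B res
    rw [List.map_cons, List.cons_append, solveAux]
    by_cases h : j < (ms[i]?.getD []).length
    · rw [if_pos h]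
      have hq : (A.map (fun i => (i, j)) ++ B.map (fun i => (i, j + 1))) ++ [(i, j + 1)]
          = A.map (fun i => (i, j)) ++ (B ++ [i]).map (fun i => (i, j + 1)) := by
        simp
      rw [hq, ih]
      have hfil : (B ++ [i]) ++ A.filter (fun i => decide (j < (ms[i]?.getD []).length))
          = B ++ (i :: A).filter (fun i => decide (j < (ms[i]?.getD []).length)) := by
        simp [h]
      rw [hfil]
      congr 1
      rw [List.flatMap_cons]
      unfold colF
      by_cases hx : (ms[i]?.getD [])[j]?.getD "" ≠ "junk"
      · rw [if_pos hx, if_pos ⟨h, hx⟩]; simp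
      · rw [if_neg hx, if_neg (by rintro ⟨-, h2⟩; exact hx h2)]; simp
    · rw [if_neg h, ih]
      have hc : colF ms j i = [] := by unfold colF; rw [if_neg]; rintro ⟨h1, -⟩; exact h h1
      rw [List.filter_cons]
      simp only [h, decide_false, Bool.false_eq_true, if_neg, not_false_iff, List.flatMap_cons, hc,
        List.nil_append]

-- starting the work-list at column j with k columns left yields the columns j, j+1, … in order
lemma colsAll (ms : List (List String)) :
    ∀ (k j : Nat) (S : List Nat) (res : List String),
      (∀ i ∈ S, (ms[i]?.getD []).length ≤ j + k) →
      solveAux ms (S.map (fun i => (i, j))) res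
        = res ++ (List.range k).flatMap (fun t => S.flatMap (colF ms (j + t))) := by
  intro k
  induction k with
  | zero =>
    intro j S res hS
    have h0 : S.map (fun i => (i, j)) = S.map (fun i => (i, j)) ++ ([] : List Nat).map (fun i => (i, j + 1)) := by simp
    rw [h0, colStep]
    have hfil : S.filter (fun i => decide (j < (ms[i]?.getD []).length)) = [] := by
      rw [List.filter_eq_nil_iff]
      intro i hi
      simp only [decide_eq_true_eq, not_lt]
      simpa using hS i hi
    have hfm : S.flatMap (colF ms j) = [] := by
      rw [List.flatMap_eq_nil_iff]
      intro i hi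
      unfold colF
      rw [if_neg]
      rintro ⟨h1, -⟩
      exact absurd (by simpa using hS i hi) (not_le.mpr h1)
    rw [hfil, hfm]
    simp [solveAux]
  | succ k ih =>
    intro j S res hS
    have h0 : S.map (fun i => (i, j)) = S.map (fun i => (i, j)) ++ ([] : List Nat).map (fun i => (i, j + 1)) := by simp
    rw [h0, colStep]
    simp only [List.nil_append]
    rw [ih (j + 1) _ _ (by
      intro i hi
      have := hS i (List.mem_of_mem_filter hi)
      omega)]
    have hrw : ∀ t : Nat,
        (S.filter (fun i => decide (j < (ms[i]?.getD []).length))).flatMap (colF ms (j + 1 + t))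
          = S.flatMap (colF ms (j + 1 + t)) := fun t =>
      flatMap_filter_colF ms j (j + 1 + t) (by omega) S
    simp only [hrw]
    rw [List.range_succ_eq_map]
    simp only [List.flatMap_cons, List.flatMap_map, Nat.add_zero, List.append_assoc]
    congr 2
    apply List.flatMap_congr   -- align j + (t+1) with j + 1 + t
    intro t _
    have : j + (t + 1) = j + 1 + t := by omega
    simp [this, Nat.succ_eq_add_one]

-- B's inner loop over mailboxes collects column j
lemma inner_loop (ms : List (List String)) (j : Nat) (l : List Nat) :
    ∀ res : List String,
      l.foldl (fun res i =>
        if j < (ms[i]?.getD []).length ∧ (ms[i]?.getD [])[j]?.getD "" ≠ "junk" then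
          res ++ [(ms[i]?.getD [])[j]?.getD ""]
        else res) res = res ++ l.flatMap (colF ms j) := by
  induction l with
  | nil => simp
  | cons i l ih =>
    intro res
    rw [List.foldl_cons, List.flatMap_cons]
    by_cases h : j < (ms[i]?.getD []).length ∧ (ms[i]?.getD [])[j]?.getD "" ≠ "junk"
    · rw [if_pos h, ih]
      unfold colF
      rw [if_pos h]
      simp
    · rw [if_neg h, ih]
      unfold colF
      rw [if_neg h]
      simp

lemma alt_eq (ms : List (List String)) :
    solve_alt ms = (List.range (ms.foldl (fun acc m => max acc m.length) 0)).flatMap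
      (fun j => (List.range ms.length).flatMap (colF ms j)) := by
  unfold solve_alt
  show (List.range (ms.foldl (fun acc m => max acc m.length) 0)).foldl
      (fun res j =>
        (List.range ms.length).foldl (fun res i =>
          if j < (ms[i]?.getD []).length ∧ (ms[i]?.getD [])[j]?.getD "" ≠ "junk" then
            res ++ [(ms[i]?.getD [])[j]?.getD ""]
          else res) res) [] = _
  have h1 : (List.range (ms.foldl (fun acc m => max acc m.length) 0)).foldl
      (fun res j =>
        (List.range ms.length).foldl (fun res i =>
          if j < (ms[i]?.getD []).length ∧ (ms[i]?.getD [])[j]?.getD "" ≠ "junk" then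
            res ++ [(ms[i]?.getD [])[j]?.getD ""]
          else res) res) ([] : List String)
      = (List.range (ms.foldl (fun acc m => max acc m.length) 0)).foldl
          (fun res j => res ++ (List.range ms.length).flatMap (colF ms j)) [] :=
    by apply PySem.List.foldl_congr_mem; intro acc x hx; exact inner_loop ms x (List.range ms.length) acc
  rw [h1, PySem.List.foldl_append_eq_flatMap]
  simp

-- ===== VERDICT (by name: the statement is the Claim_ definition above) =====
theorem solve_spec : Claim_equal_solve := by
  intro ms _
  unfold Spec_solve solve
  rw [alt_eq]
  have hbound : ∀ i ∈ List.range ms.length,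
      (ms[i]?.getD []).length ≤ 0 + ms.foldl (fun acc m => max acc m.length) 0 := by
    intro i hi
    have hi' : i < ms.length := List.mem_range.mp hi
    have hmem : ms[i] ∈ ms := List.getElem_mem hi'
    have := (PySem.List.le_foldl_max_nat ms (fun m => m.length) 0).2 ms[i] hmem
    rw [List.getElem?_eq_getElem hi']
    simpa using this
  rw [colsAll ms (ms.foldl (fun acc m => max acc m.length) 0) 0 (List.range ms.length) [] hbound]
  simp
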